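-- pv_equiv track=rewrite | github.com/Harutyun-hub/telegram_graph | api/freshness.py | _worst_status
-- ===== SOURCE A (Python) =====
-- def _worst_status(statuses: list[str]) -> str:
--     if any(s == "stale" for s in statuses):
--         return "stale"
--     if any(s == "warning" for s in statuses):
--         return "warning"
--     if any(s == "unknown" for s in statuses):
--         return "unknown"
--     return "healthy"
-- ===== SOURCE B (Python) =====
-- _RANK = {"stale": 0, "warning": 1, "unknown": 2}
-- _BACK = {0: "stale", 1: "warning", 2: "unknown", 3: "healthy"}
--
-- def _worst_status(statuses: list[str]) -> str:
--     best = 3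
--     for s in statuses:
--         best = min(best, _RANK.get(s, 3))
--     return _BACK[best]
-- ===== Notes on version B (the rewrite author's own statement) =====
-- stated objective: idiomatic
-- what changed: Replaced the three sequential any()-scans with a single pass maintaining the minimum severity rank, mapped back to a status string at the end.
import Mathlib
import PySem

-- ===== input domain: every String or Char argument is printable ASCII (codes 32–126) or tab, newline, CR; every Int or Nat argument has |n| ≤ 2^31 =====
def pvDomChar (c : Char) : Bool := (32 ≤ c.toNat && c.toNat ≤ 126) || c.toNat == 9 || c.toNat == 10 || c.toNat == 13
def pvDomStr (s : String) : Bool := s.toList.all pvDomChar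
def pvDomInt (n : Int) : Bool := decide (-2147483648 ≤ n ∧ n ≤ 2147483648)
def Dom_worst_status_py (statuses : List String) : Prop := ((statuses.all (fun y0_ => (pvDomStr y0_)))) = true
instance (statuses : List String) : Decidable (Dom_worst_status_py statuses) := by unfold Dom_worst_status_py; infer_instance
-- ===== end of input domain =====

-- B: single pass keeping the minimum severity rank instead of three any()-scans (idiomatic, same cost).
-- ===== PORT A =====
def worst_status_py (statuses : List String) : String :=
  if statuses.any (fun s => s == "stale") then "stale"
  else if statuses.any (fun s => s == "warning") then "warning"
  else if statuses.any (fun s => s == "unknown") then "unknown"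
  else "healthy"

-- ===== PORT B =====
-- _RANK.get(s, 3)
def pvRank (s : String) : Nat :=
  if s = "stale" then 0 else if s = "warning" then 1 else if s = "unknown" then 2 else 3

-- _BACK[best]
def pvBack (n : Nat) : String :=
  if n = 0 then "stale" else if n = 1 then "warning" else if n = 2 then "unknown" else "healthy"

def worst_status_py_alt (statuses : List String) : String :=
  pvBack (statuses.foldl (fun best s => min best (pvRank s)) 3)

-- ===== PRECONDITION & SPEC =====
def Spec_worst_status_py (statuses : List String) (out : String) : Prop := out = worst_status_py_alt statuses
instance (statuses : List String) (out : String) : Decidable (Spec_worst_status_py statuses out) := by unfold Spec_worst_status_py; infer_instance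

-- ===== CLAIM (what is proved, stated in full; the proofs are below) =====
def Claim_equal_worst_status_py : Prop := ∀ (statuses : List String), Dom_worst_status_py statuses → Spec_worst_status_py statuses (worst_status_py statuses)

-- ===== LEMMAS AND PROOFS =====

-- ===== VERDICT (by name: the statement is the Claim_ definition above) =====
-- Pull the starting accumulator out of the fold (only ranks ≤ 3 arise).
lemma pvFold_min (b : Nat) (t : List String) (hb : b ≤ 3) :
    t.foldl (fun best s => min best (pvRank s)) b =
      min b (t.foldl (fun best s => min best (pvRank s)) 3) := by
  induction t generalizing b with
  | nil => simp; omega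
  | cons u v ihv =>
    simp only [List.foldl_cons]
    rw [ihv (min b (pvRank u)) (by unfold pvRank; split_ifs <;> omega),
        ihv (min 3 (pvRank u)) (by unfold pvRank; split_ifs <;> omega)]
    omega

-- The fold's value, characterised by A's three scans.
lemma pvFold_char (l : List String) :
    l.foldl (fun best s => min best (pvRank s)) 3 =
      (if l.any (fun s => s == "stale") then 0
       else if l.any (fun s => s == "warning") then 1
       else if l.any (fun s => s == "unknown") then 2 else 3) := by
  induction l with
  | nil => simp
  | cons s t ih =>
    simp only [List.foldl_cons, List.any_cons]
    rw [pvFold_min (min 3 (pvRank s)) t (by omega), ih]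
    unfold pvRank
    by_cases h1 : s = "stale" <;> by_cases h2 : s = "warning" <;> by_cases h3 : s = "unknown" <;>
      simp [h1, h2, h3] <;> split_ifs <;> omega

theorem worst_status_py_spec : Claim_equal_worst_status_py := by
  intro statuses _
  unfold Spec_worst_status_py worst_status_py worst_status_py_alt
  rw [pvFold_char]
  unfold pvBack
  split_ifs <;> simp_all
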